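-- pv_equiv track=rewrite | github.com/zakk-h/Markov_Music_Generation | pitch.py | generate_possible_notes_in_range
-- ===== SOURCE A (Python) =====
-- def generate_possible_notes_in_range(notes, lower_note_bound, num_notes):
--     generated_notes = []
--     start_index = notes.index(lower_note_bound)
--
--     octave = 0
--
--     while num_notes > 0:
--         for i in range(start_index, len(notes)):
--             generated_notes.append(notes[i]+octave)
--             num_notes -= 1
--             if num_notes == 0:
--                 break
--         start_index = 0  # Reset to start of the notes array for the next cycle
--         octave+=7
--
--     return generated_notes
-- ===== SOURCE B (Python) =====
-- def generate_possible_notes_in_range(notes, lower_note_bound, num_notes):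
--     s = notes.index(lower_note_bound)
--     n = len(notes)
--     return [notes[(s + k) % n] + 7 * ((s + k) // n) for k in range(num_notes)]
-- ===== Notes on version B (the rewrite author's own statement) =====
-- stated objective: simpler
-- what changed: Replaces the while-loop with a reset start_index and an accumulated octave counter by a single comprehension deriving each note's index and octave from the absolute position s+k via mod and floor division.
import Mathlib
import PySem

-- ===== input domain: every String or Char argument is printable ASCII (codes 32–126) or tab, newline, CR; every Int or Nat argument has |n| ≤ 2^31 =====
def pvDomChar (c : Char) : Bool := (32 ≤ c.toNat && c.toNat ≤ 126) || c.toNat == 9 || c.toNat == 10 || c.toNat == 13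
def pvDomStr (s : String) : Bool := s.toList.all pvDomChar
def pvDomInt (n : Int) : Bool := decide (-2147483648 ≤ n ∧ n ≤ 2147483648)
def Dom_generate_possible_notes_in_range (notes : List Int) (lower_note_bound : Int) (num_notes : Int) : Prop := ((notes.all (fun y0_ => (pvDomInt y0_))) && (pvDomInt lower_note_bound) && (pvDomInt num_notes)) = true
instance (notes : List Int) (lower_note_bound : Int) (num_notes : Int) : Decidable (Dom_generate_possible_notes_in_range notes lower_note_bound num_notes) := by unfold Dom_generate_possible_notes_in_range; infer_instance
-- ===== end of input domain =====

-- B replaces A's while-loop (reset start_index + accumulated octave) by one comprehension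
-- deriving each note from its absolute position via mod / floor division (objective: simpler).


-- ===== PORT A =====
-- the 'for i in range(start_index, len(notes))' loop with its break; returns (generated_notes, num_notes)
def pvInnerA (notes : List Int) : List Int → Int → List Int → Int → List Int × Int
  | [], _, gen, num => (gen, num)
  | i :: rest, octave, gen, num =>
      let gen' := gen ++ [PySem.List.pyGetD notes i 0 + octave]
      let num' := num - 1
      if num' = 0 then (gen', num') else pvInnerA notes rest octave gen' num'

-- the 'while num_notes > 0' loop; fuel = num_notes.toNat suffices (each pass emits ≥ 1 note)
def pvWhileA (notes : List Int) : Nat → Int → Int → List Int → Int → List Int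
  | 0, _, _, gen, _ => gen
  | fuel + 1, start, octave, gen, num =>
      if 0 < num then
        let p := pvInnerA notes (PySem.List.pyRange start (PySem.List.len notes) 1) octave gen num
        pvWhileA notes fuel 0 (octave + 7) p.1 p.2
      else gen

def generate_possible_notes_in_range (notes : List Int) (lower_note_bound : Int) (num_notes : Int) : List Int :=
  match PySem.List.index? notes lower_note_bound with
  | none => []  -- notes.index(lower_note_bound) raises ValueError here: excluded by Pre_
  | some s => pvWhileA notes num_notes.toNat (s : Int) 0 [] num_notes

-- ===== PORT B =====
def generate_possible_notes_in_range_alt (notes : List Int) (lower_note_bound : Int) (num_notes : Int) : List Int :=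
  match PySem.List.index? notes lower_note_bound with
  | none => []  -- notes.index(lower_note_bound) raises ValueError here: excluded by Pre_
  | some s =>
      let n := PySem.List.len notes
      (PySem.List.pyRange 0 num_notes 1).map (fun k =>
        PySem.List.pyGetD notes (PySem.Int.mod ((s : Int) + k) n) 0
          + 7 * PySem.Int.floordiv ((s : Int) + k) n)

-- ===== PRECONDITION & SPEC =====
-- Pre_ excludes exactly the inputs where notes.index(lower_note_bound) raises ValueError.
def Pre_generate_possible_notes_in_range (notes : List Int) (lower_note_bound : Int) (num_notes : Int) : Prop :=
  lower_note_bound ∈ notes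
instance (notes : List Int) (lower_note_bound : Int) (num_notes : Int) : Decidable (Pre_generate_possible_notes_in_range notes lower_note_bound num_notes) := by unfold Pre_generate_possible_notes_in_range; infer_instance
def pvWitness_generate_possible_notes_in_range : List Int × Int × Int := ([1, 3, 5], 3, 7)

def Spec_generate_possible_notes_in_range (notes : List Int) (lower_note_bound : Int) (num_notes : Int) (out : List Int) : Prop := out = generate_possible_notes_in_range_alt notes lower_note_bound num_notes
instance (notes : List Int) (lower_note_bound : Int) (num_notes : Int) (out : List Int) : Decidable (Spec_generate_possible_notes_in_range notes lower_note_bound num_notes out) := by unfold Spec_generate_possible_notes_in_range; infer_instance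

-- ===== CLAIM (what is proved, stated in full; the proofs are below) =====
def Claim_equal_generate_possible_notes_in_range : Prop := ∀ (notes : List Int) (lower_note_bound : Int) (num_notes : Int), Dom_generate_possible_notes_in_range notes lower_note_bound num_notes → Pre_generate_possible_notes_in_range notes lower_note_bound num_notes → Spec_generate_possible_notes_in_range notes lower_note_bound num_notes (generate_possible_notes_in_range notes lower_note_bound num_notes)

-- ===== LEMMAS AND PROOFS =====

-- the inner for-loop appends min(len idxs, num) notes and decrements num accordingly
lemma pvInnerA_spec (notes : List Int) (idxs : List Int) (octave : Int) (gen : List Int)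
    (num : Int) (h : 0 < num) :
    pvInnerA notes idxs octave gen num =
      (gen ++ (idxs.take num.toNat).map (fun j => PySem.List.pyGetD notes j 0 + octave),
       num - min idxs.length num.toNat) := by
  induction idxs generalizing gen num with
  | nil => simp [pvInnerA]
  | cons i rest ih =>
    simp only [pvInnerA]
    by_cases h1 : num - 1 = 0
    · have hnum : num = 1 := by omega
      subst hnum
      simp
    · rw [if_neg h1, ih _ _ (by omega)]
      have ht : num.toNat = (num - 1).toNat + 1 := by omega
      refine Prod.ext ?_ ?_
      · simp only [ht, List.take_succ_cons, List.map_cons, List.append_assoc]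
        simp
      · simp only [List.length_cons]
        omega

lemma pvWhileA_nonpos (notes : List Int) (fuel : Nat) (start octave : Int) (gen : List Int)
    (num : Int) (h : num ≤ 0) :
    pvWhileA notes fuel start octave gen num = gen := by
  cases fuel with
  | zero => rfl
  | succ fuel => simp only [pvWhileA, if_neg (by omega : ¬ (0:Int) < num)]

lemma pv_mod_add_self (k n : Int) (hn : 0 < n) :
    PySem.Int.mod (n + k) n = PySem.Int.mod k n := by
  rw [PySem.Int.mod_eq_emod_of_pos hn, PySem.Int.mod_eq_emod_of_pos hn,
    show n + k = k + n * 1 by ring, Int.add_mul_emod_self_left]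

lemma pv_floordiv_add_self (k n : Int) (hn : 0 < n) :
    PySem.Int.floordiv (n + k) n = PySem.Int.floordiv k n + 1 := by
  rw [PySem.Int.floordiv_eq_ediv_of_pos hn, PySem.Int.floordiv_eq_ediv_of_pos hn]
  rw [show n + k = k + n * 1 by ring, Int.add_mul_ediv_left k 1 (by omega : n ≠ 0)]

-- characterisation of A's while-loop: it produces B's comprehension (shifted by octave)
lemma pvWhileA_spec (notes : List Int) (hne : notes ≠ []) :
    ∀ (fuel : Nat) (num start octave : Int) (gen : List Int),
      num.toNat ≤ fuel → 0 ≤ start → start < (notes.length : Int) →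
      pvWhileA notes fuel start octave gen num =
        gen ++ (PySem.List.pyRange 0 num 1).map (fun k =>
          PySem.List.pyGetD notes (PySem.Int.mod (start + k) (notes.length : Int)) 0
            + octave + 7 * PySem.Int.floordiv (start + k) (notes.length : Int)) := by
  intro fuel
  induction fuel with
  | zero =>
    intro num start octave gen hfuel h0 hlt
    rw [pvWhileA_nonpos _ _ _ _ _ _ (by omega), PySem.List.pyRange_one_eq_nil (by omega)]
    simp
  | succ fuel ih =>
    intro num start octave gen hfuel h0 hlt
    by_cases hpos : 0 < num
    case neg =>
      rw [pvWhileA_nonpos _ _ _ _ _ _ (by omega), PySem.List.pyRange_one_eq_nil (by omega)]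
      simp
    case pos =>
    have hn : (0:Int) < (notes.length : Int) := by
      have : notes.length ≠ 0 := by simpa using hne
      omega
    simp only [pvWhileA, if_pos hpos, PySem.List.len_eq]
    rw [pvInnerA_spec _ _ _ _ _ hpos, PySem.List.length_pyRange_one]
    by_cases hle : num ≤ (notes.length : Int) - start
    · -- the remaining notes all fit in this pass: num' = 0
      have hmin : min ((notes.length : Int) - start).toNat num.toNat = num.toNat := by omega
      rw [hmin, show num - (num.toNat : Int) = 0 by omega,
        pvWhileA_nonpos _ _ _ _ _ _ le_rfl,
        PySem.List.pyRange_one start, PySem.List.pyRange_one 0,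
        ← List.map_take, List.take_range,
        show min num.toNat ((notes.length : Int) - start).toNat = num.toNat by omega]
      simp only [List.map_map, sub_zero]
      congr 1
      apply List.map_congr_left
      intro k hk
      rw [List.mem_range] at hk
      have h1 : (0:Int) ≤ start + (k : Int) := by omega
      have h2 : start + (k : Int) < (notes.length : Int) := by omega
      simp only [Function.comp_apply, zero_add]
      rw [PySem.Int.mod_eq_emod_of_pos hn, Int.emod_eq_of_lt h1 h2,
        PySem.Int.floordiv_eq_ediv_of_pos hn, Int.ediv_eq_zero_of_lt h1 h2]
      ring
    · -- this pass uses the whole tail of notes; recurse with start_index = 0, octave + 7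
      have hmin : min ((notes.length : Int) - start).toNat num.toNat
          = ((notes.length : Int) - start).toNat := by omega
      rw [hmin, show num - ((((notes.length : Int) - start).toNat : Int))
            = num - ((notes.length : Int) - start) by omega,
        List.take_of_length_le (by rw [PySem.List.length_pyRange_one]; omega),
        ih _ _ _ _ (by omega) le_rfl hn, List.append_assoc]
      congr 1
      rw [PySem.List.pyRange_one_append 0 ((notes.length : Int) - start) num (by omega) (by omega),
        List.map_append]
      congr 1
      · rw [PySem.List.pyRange_one start, PySem.List.pyRange_one 0]
        simp only [List.map_map, sub_zero]
        apply List.map_congr_left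
        intro k hk
        rw [List.mem_range] at hk
        have h1 : (0:Int) ≤ start + (k : Int) := by omega
        have h2 : start + (k : Int) < (notes.length : Int) := by omega
        simp only [Function.comp_apply, zero_add]
        rw [PySem.Int.mod_eq_emod_of_pos hn, Int.emod_eq_of_lt h1 h2,
          PySem.Int.floordiv_eq_ediv_of_pos hn, Int.ediv_eq_zero_of_lt h1 h2]
        ring
      · rw [PySem.List.pyRange_one 0, PySem.List.pyRange_one ((notes.length : Int) - start)]
        simp only [List.map_map, sub_zero]
        apply List.map_congr_left
        intro k hk
        simp only [Function.comp_apply, zero_add]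
        rw [show start + ((notes.length : Int) - start + (k : Int))
              = (notes.length : Int) + (k : Int) by ring,
          pv_mod_add_self _ _ hn, pv_floordiv_add_self _ _ hn]
        ring

theorem pv_main (notes : List Int) (lower_note_bound : Int) (num_notes : Int)
    (hpre : lower_note_bound ∈ notes) :
    generate_possible_notes_in_range notes lower_note_bound num_notes =
      generate_possible_notes_in_range_alt notes lower_note_bound num_notes := by
  obtain ⟨s, hs⟩ := Option.isSome_iff_exists.mp
    ((PySem.List.index?_isSome_iff notes lower_note_bound).mpr hpre)
  obtain ⟨hk, -, -⟩ := PySem.List.getElem_of_index?_eq_some hs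
  have hne : notes ≠ [] := List.ne_nil_of_mem hpre
  simp only [generate_possible_notes_in_range, generate_possible_notes_in_range_alt]
  rw [hs]
  dsimp only
  rw [pvWhileA_spec notes hne num_notes.toNat num_notes (s : Int) 0 [] le_rfl
    (by omega) (by exact_mod_cast hk)]
  simp [PySem.List.len_eq]

-- ===== VERDICT (by name: the statement is the Claim_ definition above) =====
theorem generate_possible_notes_in_range_spec : Claim_equal_generate_possible_notes_in_range := by
  intro notes lnb num _ hpre
  exact pv_main notes lnb num hpre
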